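-- pv_equiv track=rewrite | github.com/mmzaghlool/Wuzzuf-ML | utilities.py | addBinaryAsFeaturesFromList
-- ===== SOURCE A (Python) =====
-- def addBinaryAsFeaturesFromList(enum, column):
--     result = {}
--
--     for i in enum:
--         subResult = []
--
--         for listCell in column:
--             found = False
--
--             for item in listCell:
--                 if i == item:
--                     found = True
--
--             if found:
--                 subResult.append(1)
--             else:
--                 subResult.append(0)
--
--         result[i] = subResult
--     return result
-- ===== SOURCE B (Python) =====
-- def addBinaryAsFeaturesFromList(enum, column):
--     # Inverted index: one pass over the column maps each item to the set of row
--     # indices whose cell contains it; each membership vector is then produced by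
--     # index lookups over range(n), with no per-enum-value rescan of the column.
--     index = {}
--     for r, listCell in enumerate(column):
--         for item in listCell:
--             index.setdefault(item, set()).add(r)
--     n = len(column)
--     result = {}
--     for i in enum:
--         rows = index.get(i, set())
--         result[i] = [1 if r in rows else 0 for r in range(n)]
--     return result
-- ===== Notes on version B (the rewrite author's own statement) =====
-- stated objective: faster
-- what changed: B builds an inverted index (item -> set of row indices) in one pass over the column, then reads each enum value's membership vector off the index over range(n), instead of A's per-enum-value rescan of every cell with == comparisons.
import Mathlib
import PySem

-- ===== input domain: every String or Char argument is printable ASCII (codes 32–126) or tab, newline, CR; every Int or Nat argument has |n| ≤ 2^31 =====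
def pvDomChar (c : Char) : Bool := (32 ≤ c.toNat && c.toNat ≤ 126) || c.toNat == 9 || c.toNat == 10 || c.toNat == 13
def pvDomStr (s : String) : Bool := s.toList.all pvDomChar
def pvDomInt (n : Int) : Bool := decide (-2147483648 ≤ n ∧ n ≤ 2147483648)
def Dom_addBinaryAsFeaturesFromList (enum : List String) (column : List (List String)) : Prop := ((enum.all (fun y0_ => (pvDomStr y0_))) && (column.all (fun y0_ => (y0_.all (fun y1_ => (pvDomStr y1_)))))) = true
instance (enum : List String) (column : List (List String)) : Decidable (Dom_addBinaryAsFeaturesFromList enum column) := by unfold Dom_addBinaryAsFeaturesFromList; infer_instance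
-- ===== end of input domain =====

-- B replaces A's per-enum-value column rescans by an inverted index (item -> set of row
-- indices) built in one pass; each vector is then read off by index lookups (objective: alternative).

-- ===== PORT A =====
def addBinaryAsFeaturesFromList (enum : List String) (column : List (List String)) : List (String × List Int) :=
  (enum.foldl (fun result i =>
    let subResult : List Int := column.foldl (fun subResult listCell =>
      let found := listCell.foldl (fun found item => if i == item then true else found) false
      if found then subResult ++ [1] else subResult ++ [0]) []
    result.insert i subResult) PySem.Dict.empty).items

-- ===== PORT B =====
def addBinaryAsFeaturesFromList_alt (enum : List String) (column : List (List String)) : List (String × List Int) :=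
  let index : PySem.Dict String (List Int) :=
    (PySem.List.enumerate column).foldl (fun d p =>
      p.2.foldl (fun d item => d.modify item [] (fun s => PySem.Set.add s p.1)) d)
      PySem.Dict.empty
  let n : Int := column.length
  (enum.foldl (fun result i =>
      let rows := index.getD i []
      result.insert i ((PySem.List.pyRange 0 n 1).map
        (fun r => if rows.contains r then (1 : Int) else 0)))
    PySem.Dict.empty).items

-- ===== PRECONDITION & SPEC =====
def Spec_addBinaryAsFeaturesFromList (enum : List String) (column : List (List String)) (out : List (String × List Int)) : Prop := out = addBinaryAsFeaturesFromList_alt enum column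
instance (enum : List String) (column : List (List String)) (out : List (String × List Int)) : Decidable (Spec_addBinaryAsFeaturesFromList enum column out) := by unfold Spec_addBinaryAsFeaturesFromList; infer_instance

-- ===== CLAIM =====
def Claim_equal_addBinaryAsFeaturesFromList : Prop := ∀ (enum : List String) (column : List (List String)), Dom_addBinaryAsFeaturesFromList enum column → Spec_addBinaryAsFeaturesFromList enum column (addBinaryAsFeaturesFromList enum column)

-- ===== LEMMAS AND PROOFS =====

-- the 0/1 bit for enum value i at one column cell
def pvBit (i : String) (cell : List String) : Int :=
  if cell.any (fun item => i == item) then 1 else 0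

-- A's inner "found" loop is an any-scan
lemma found_eq_any (i : String) (cell : List String) (b : Bool) :
    cell.foldl (fun found item => if i == item then true else found) b
      = (b || cell.any (fun item => i == item)) := by
  induction cell generalizing b with
  | nil => simp
  | cons x xs ih =>
    rw [List.foldl_cons, List.any_cons]
    by_cases h : (i == x) = true
    · rw [if_pos h, ih, h]; simp
    · have h' : (i == x) = false := by simpa using h
      rw [if_neg h, ih, h']; simp

-- A's subResult loop builds column.map (pvBit i)
lemma subResult_eq_map (i : String) (column : List (List String)) (acc : List Int) :
    column.foldl (fun subResult listCell =>
        let found := listCell.foldl (fun found item => if i == item then true else found) false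
        if found then subResult ++ [1] else subResult ++ [0]) acc
      = acc ++ column.map (pvBit i) := by
  induction column generalizing acc with
  | nil => simp
  | cons c cs ih =>
    rw [List.foldl_cons]
    dsimp only
    rw [found_eq_any, Bool.false_or]
    by_cases h : (c.any fun item => i == item) = true
    · rw [if_pos h, ih]
      simp [pvBit, h]
    · have h' : (c.any fun item => i == item) = false := Bool.eq_false_iff.mpr h
      rw [if_neg h, ih]
      simp [pvBit, h']

-- contains on a shaped dict is membership in the key list
lemma contains_shape (v : String → List Int) (S : List String) (k : String) :
    (PySem.Dict.mk (S.map fun i => (i, v i))).contains k = decide (k ∈ S) := by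
  rw [PySem.Dict.contains_mk]
  simp only [List.any_map, Function.comp_def]
  induction S with
  | nil => simp
  | cons a t ih =>
    by_cases h : a = k
    · simp [List.any_cons, h]
    · simp [List.any_cons, ih, h, Ne.symm h]

-- inserting (k, g k) into a g-shaped dict adds k as a set element
lemma insert_shape_add (g : String → List Int) (S : List String) (k : String) :
    (PySem.Dict.mk (S.map fun i => (i, g i))).insert k (g k)
      = PySem.Dict.mk ((PySem.Set.add S k).map fun i => (i, g i)) := by
  by_cases h : k ∈ S
  · have hadd : PySem.Set.add S k = S := by
      simp [PySem.Set.add, List.contains_eq_mem, h]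
    rw [hadd]
    apply PySem.Dict.ext
    rw [PySem.Dict.items_insert]
    rw [contains_shape g S k]
    simp only [h, decide_true, if_true, List.map_map]
    apply List.map_congr_left
    intro i _
    by_cases hik : i = k
    · subst hik; simp
    · simp [Function.comp, hik]
  · apply PySem.Dict.ext
    rw [PySem.Dict.items_insert, contains_shape g S k]
    simp [PySem.Set.add, List.contains_eq_mem, h]

-- folding insert of (i, g i) over enum, from a g-shaped state
lemma foldl_insert_shape (g : String → List Int) (enum : List String) :
    ∀ S : List String,
      enum.foldl (fun d i => d.insert i (g i)) (PySem.Dict.mk (S.map fun i => (i, g i)))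
        = PySem.Dict.mk ((enum.foldl PySem.Set.add S).map fun i => (i, g i)) := by
  induction enum with
  | nil => intro S; rfl
  | cons x xs ih =>
    intro S
    simp only [List.foldl_cons, insert_shape_add g S x]
    exact ih (PySem.Set.add S x)

-- the same fold from the empty dict yields the ordered-dedup key list
lemma foldl_insert_ofList (g : String → List Int) (enum : List String) :
    enum.foldl (fun d i => d.insert i (g i)) PySem.Dict.empty
      = PySem.Dict.mk ((PySem.Set.ofList enum).map fun i => (i, g i)) := by
  have h := foldl_insert_shape g enum []
  simpa [PySem.Set.ofList, PySem.Set.empty, PySem.Dict.empty] using h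

-- Set.add membership as a Boolean disjunction
lemma contains_set_add (s : List Int) (x y : Int) :
    List.contains (PySem.Set.add s x) y = (List.contains s y || y == x) := by
  simp only [List.contains_eq_mem]
  by_cases hyx : y = x
  · subst hyx
    simp [PySem.Set.mem_add]
  · simp [PySem.Set.mem_add, hyx]

-- one cell's item loop, seen through getD/contains
lemma cell_fold_contains (items : List String) (j : Int) (d : PySem.Dict String (List Int))
    (i : String) (r : Int) :
    ((items.foldl (fun d item => d.modify item [] (fun s => PySem.Set.add s j)) d).getD i []).contains r
      = ((d.getD i []).contains r || (r == j && items.contains i)) := by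
  induction items generalizing d with
  | nil => simp
  | cons x xs ih =>
    rw [List.foldl_cons, ih]
    by_cases hix : i = x
    · subst hix
      have hstep : ((d.modify i [] fun s => PySem.Set.add s j).getD i [])
          = PySem.Set.add (d.getD i []) j := by
        rw [PySem.Dict.getD_modify]; simp
      rw [hstep, contains_set_add]
      simp only [List.contains_cons, BEq.rfl, Bool.true_or, Bool.and_true]
      cases hc : (d.getD i []).contains r <;> cases hrj : (r == j) <;>
        cases hxs : xs.contains i <;> simp
    · have hstep : ((d.modify x [] fun s => PySem.Set.add s j).getD i [])
          = d.getD i [] := by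
        rw [PySem.Dict.getD_modify, if_neg hix]
      rw [hstep]
      have : (x :: xs).contains i = xs.contains i := by
        simp [hix]
      rw [this]

-- the whole index-building loop, seen through getD/contains
lemma index_fold_contains (cs : List (List String)) (s : Int) (d : PySem.Dict String (List Int))
    (i : String) (r : Int) :
    (((PySem.List.enumerate cs s).foldl (fun d p =>
        p.2.foldl (fun d item => d.modify item [] (fun t => PySem.Set.add t p.1)) d) d).getD i []).contains r
      = ((d.getD i []).contains r
          || (PySem.List.enumerate cs s).any (fun p => r == p.1 && p.2.contains i)) := by
  induction cs generalizing s d with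
  | nil => simp [PySem.List.enumerate_nil]
  | cons c cs ih =>
    rw [PySem.List.enumerate_cons, List.foldl_cons, ih, List.any_cons]
    rw [cell_fold_contains]
    simp [Bool.or_assoc]

-- an any over enumerate testing an index below the start is false
lemma any_enumerate_lt (cs : List (List String)) (s r : Int) (h : r < s)
    (f : List String → Bool) :
    (PySem.List.enumerate cs s).any (fun p => r == p.1 && f p.2) = false := by
  induction cs generalizing s with
  | nil => simp [PySem.List.enumerate_nil]
  | cons c cs ih =>
    rw [PySem.List.enumerate_cons, List.any_cons]
    have hr : (r == s) = false := by simp; omega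
    rw [ih (s + 1) (by omega)]
    simp [hr]

-- an any over enumerate testing index s+k picks out cell k
lemma any_enumerate_at (cs : List (List String)) (s : Int) (k : Nat) (hk : k < cs.length)
    (f : List String → Bool) :
    (PySem.List.enumerate cs s).any (fun p => (s + k) == p.1 && f p.2) = f cs[k] := by
  induction cs generalizing s k with
  | nil => simp at hk
  | cons c cs ih =>
    rw [PySem.List.enumerate_cons, List.any_cons]
    cases k with
    | zero =>
      have h1 : ((s + (0 : Nat)) == s) = true := by simp
      rw [any_enumerate_lt cs (s + 1) (s + (0 : Nat)) (by omega)]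
      simp
    | succ k =>
      have h1 : ((s + (k + 1 : Nat)) == s) = false := by simp; omega
      have h2 : (s + (k + 1 : Nat) : Int) = (s + 1) + k := by push_cast; ring
      rw [h1, h2, ih (s + 1) k (by simpa using hk)]
      simp

-- B's index lookup reproduces A's per-cell bit
lemma vec_eq (i : String) (column : List (List String)) :
    column.map (pvBit i)
      = (PySem.List.pyRange 0 (column.length : Int) 1).map
          (fun r => if (((PySem.List.enumerate column).foldl (fun d p =>
              p.2.foldl (fun d item => d.modify item [] (fun t => PySem.Set.add t p.1)) d)
              PySem.Dict.empty).getD i []).contains r then (1 : Int) else 0) := by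
  apply List.ext_getElem
  · simp [PySem.List.length_pyRange_one]
  · intro k h1 h2
    have hk : k < column.length := by simpa using h1
    rw [List.getElem_map, List.getElem_map, PySem.List.getElem_pyRange_one]
    rw [index_fold_contains column 0 PySem.Dict.empty i ((0 : Int) + k)]
    rw [PySem.Dict.getD_empty]
    rw [any_enumerate_at column 0 k hk (fun cell => cell.contains i)]
    simp only [List.contains_eq_mem, pvBit]
    simp [List.any_beq']

-- ===== VERDICT =====
theorem addBinaryAsFeaturesFromList_spec : Claim_equal_addBinaryAsFeaturesFromList := by
  intro enum column _
  show addBinaryAsFeaturesFromList enum column = addBinaryAsFeaturesFromList_alt enum column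
  have hfunA : (fun (result : PySem.Dict String (List Int)) (i : String) =>
      let subResult : List Int := column.foldl (fun subResult listCell =>
        let found := listCell.foldl (fun found item => if i == item then true else found) false
        if found then subResult ++ [1] else subResult ++ [0]) []
      result.insert i subResult)
      = (fun (result : PySem.Dict String (List Int)) (i : String) =>
          result.insert i (column.map (pvBit i))) := by
    funext result i
    show result.insert i (column.foldl _ []) = _
    rw [subResult_eq_map i column []]
    rfl
  have hA : addBinaryAsFeaturesFromList enum column
      = (enum.foldl (fun d i => d.insert i (column.map (pvBit i))) PySem.Dict.empty).items := by
    unfold addBinaryAsFeaturesFromList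
    rw [hfunA]
  rw [hA, addBinaryAsFeaturesFromList_alt]
  rw [foldl_insert_ofList (fun i => column.map (pvBit i)) enum]
  rw [foldl_insert_ofList (fun i =>
      (PySem.List.pyRange 0 (column.length : Int) 1).map
        (fun r => if (((PySem.List.enumerate column).foldl (fun d p =>
            p.2.foldl (fun d item => d.modify item [] (fun t => PySem.Set.add t p.1)) d)
            PySem.Dict.empty).getD i []).contains r then (1 : Int) else 0)) enum]
  exact List.map_congr_left (fun i _ => congrArg (fun v => (i, v)) (vec_eq i column))
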